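-- pv_equiv track=rewrite | github.com/PyyLog/NLP-Concepts | tokenizer.py | get_occurences
-- ===== SOURCE A (Python) =====
-- def get_occurences(matrix):
--     occurences_list, unique_words_matrix = [], []
--
--     for list in matrix:
--         sublist, occurences_sublist = [], []
--         unique_words_matrix.append(sublist)
--         occurences_list.append(occurences_sublist)
--
--         for word in list:
--             if word not in sublist:
--                 sublist.append(word)
--                 occurences_sublist.append(list.count(word))
--
--     return unique_words_matrix, occurences_list
-- ===== SOURCE B (Python) =====
-- def get_occurences(matrix):
--     unique_words_matrix, occurences_list = [], []
--     for lst in matrix: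
--         words, occs = [], []
--         while lst:
--             w = lst[0]
--             rest = [x for x in lst[1:] if x != w]
--             words.append(w)
--             occs.append(len(lst) - len(rest))
--             lst = rest
--         unique_words_matrix.append(words)
--         occurences_list.append(occs)
--     return unique_words_matrix, occurences_list
-- ===== Notes on version B (the rewrite author's own statement) =====
-- stated objective: alternative
-- what changed: Replaces A's grow-a-unique-list-with-membership-tests-and-list.count algorithm by repeated head extraction: take the first word, filter all its occurrences out of the remainder, derive its count from the length drop, and continue on the shrunken list until empty.
import Mathlib
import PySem

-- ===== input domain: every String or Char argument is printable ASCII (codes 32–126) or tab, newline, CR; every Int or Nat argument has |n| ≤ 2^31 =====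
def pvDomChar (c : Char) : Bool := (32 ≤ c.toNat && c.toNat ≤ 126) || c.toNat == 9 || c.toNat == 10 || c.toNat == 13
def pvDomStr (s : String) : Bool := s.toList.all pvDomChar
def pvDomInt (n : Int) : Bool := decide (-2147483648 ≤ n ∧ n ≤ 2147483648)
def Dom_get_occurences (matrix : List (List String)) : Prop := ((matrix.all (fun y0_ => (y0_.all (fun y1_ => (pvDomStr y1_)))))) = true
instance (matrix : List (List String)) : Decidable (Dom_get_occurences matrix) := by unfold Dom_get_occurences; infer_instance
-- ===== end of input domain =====

-- B replaces A's membership tests and list.count scans by repeated head extraction: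
-- take the first word, filter its occurrences out, read its count off the length drop,
-- and loop on the shrunken list (alternative decomposition, similar cost).

-- ===== PORT A =====
def get_occurences (matrix : List (List String)) : List (List String) × List (List Int) :=
  let r := matrix.foldl (fun (acc : List (List String) × List (List Int)) l =>
    -- inner loop: 'for word in list: if word not in sublist: append word; append list.count(word)'
    let p := l.foldl (fun (st : List String × List Int) word =>
      if st.1.contains word then st
      else (st.1 ++ [word], st.2 ++ [(PySem.List.count l word : Int)])) ([], [])
    (acc.1 ++ [p.1], acc.2 ++ [p.2])) ([], [])
  (r.1, r.2)

-- ===== PORT B =====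
-- 'while lst: w = lst[0]; rest = [x for x in lst[1:] if x != w]; append w; append len(lst)-len(rest); lst = rest'
def pvUniqLoop : List String → List String → List Int → List String × List Int
  | [], words, occs => (words, occs)
  | w :: t, words, occs =>
    pvUniqLoop (t.filter (fun x => x ≠ w)) (words ++ [w])
      (occs ++ [((w :: t).length : Int) - ((t.filter (fun x => x ≠ w)).length : Int)])
termination_by l => l.length
decreasing_by
  simp only [List.length_cons, List.length_unattach]
  refine Nat.lt_succ_of_le (le_trans (List.length_filter_le _ _) ?_)
  simp

def get_occurences_alt (matrix : List (List String)) : List (List String) × List (List Int) :=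
  let r := matrix.foldl (fun (acc : List (List String) × List (List Int)) l =>
    let p := pvUniqLoop l [] []
    (acc.1 ++ [p.1], acc.2 ++ [p.2])) ([], [])
  (r.1, r.2)

-- ===== PRECONDITION & SPEC =====
def Spec_get_occurences (matrix : List (List String)) (out : List (List String) × List (List Int)) : Prop := out = get_occurences_alt matrix
instance (matrix : List (List String)) (out : List (List String) × List (List Int)) : Decidable (Spec_get_occurences matrix out) := by unfold Spec_get_occurences; infer_instance

-- ===== CLAIM (what is proved, stated in full; the proofs are below) =====
def Claim_equal_get_occurences : Prop := ∀ (matrix : List (List String)), Dom_get_occurences matrix → Spec_get_occurences matrix (get_occurences matrix)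

-- ===== LEMMAS AND PROOFS =====

-- abbreviation for A's inner step with an arbitrary count table
def pvStep (cnt : String → Int) (st : List String × List Int) (word : String) : List String × List Int :=
  if st.1.contains word then st else (st.1 ++ [word], st.2 ++ [cnt word])

-- elements equal to some member of the seen list are skipped: filtering them out changes nothing
lemma pvSkip (cnt : String → Int) (w : String) :
    ∀ (t : List String) (st : List String × List Int), w ∈ st.1 →
      t.foldl (pvStep cnt) st = (t.filter (fun x => x ≠ w)).foldl (pvStep cnt) st := by
  intro t
  induction t with
  | nil => intro st _; rfl
  | cons a t ih =>
    intro st hw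
    by_cases h : a = w
    · subst h
      have hc : st.1.contains a = true := by simpa using hw
      rw [List.foldl_cons, List.filter_cons]
      simp only [pvStep, hc, if_true, show (decide (a ≠ a)) = false by simp]
      simp only [Bool.false_eq_true, if_false]
      exact ih st hw
    · have hw' : w ∈ (pvStep cnt st a).1 := by
        unfold pvStep; split
        · exact hw
        · exact List.mem_append_left _ hw
      rw [List.foldl_cons, List.filter_cons]
      simp only [show (decide (a ≠ w)) = true by simp [h], if_true]
      rw [List.foldl_cons]
      exact ih (pvStep cnt st a) hw'

-- prefixes of the seen/count accumulators that no element of t touches factor out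
lemma pvShift (cnt : String → Int) :
    ∀ (t : List String) (ws u : List String) (os v : List Int), (∀ x ∈ t, x ∉ ws) →
      t.foldl (pvStep cnt) (ws ++ u, os ++ v)
        = (ws ++ (t.foldl (pvStep cnt) (u, v)).1, os ++ (t.foldl (pvStep cnt) (u, v)).2) := by
  intro t
  induction t with
  | nil => intro ws u os v _; rfl
  | cons a t ih =>
    intro ws u os v h
    have ha : a ∉ ws := h a (by simp)
    have hcont : (ws ++ u).contains a = u.contains a := by
      simp [List.contains_eq_mem, ha]
    simp only [List.foldl_cons, pvStep, hcont]
    by_cases hu : u.contains a = true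
    · simp only [hu, if_true]
      exact ih ws u os v (fun x hx => h x (by simp [hx]))
    · simp only [hu, List.append_assoc]
      exact ih ws (u ++ [a]) os (v ++ [cnt a]) (fun x hx => h x (by simp [hx]))

-- partition identity: length = count of the head + length of the filtered remainder
lemma pvLenSplit (w : String) : ∀ t : List String, t.length = t.count w + (t.filter (fun x => x ≠ w)).length := by
  intro t
  induction t with
  | nil => rfl
  | cons a t ih =>
    rw [List.filter_cons]
    by_cases h : a = w
    · subst h
      simp only [List.count_cons_self, show (decide (a ≠ a)) = false by simp,
        Bool.false_eq_true, if_false, List.length_cons]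
      omega
    · rw [List.count_cons_of_ne (by exact fun hh => h hh)]
      simp only [show (decide (a ≠ w)) = true by simp [h], if_true, List.length_cons]
      omega

-- the head's count equals the length drop caused by filtering it out
lemma pvCountLen (w : String) (t : List String) :
    ((w :: t).count w : Int) = ((w :: t).length : Int) - ((t.filter (fun x => x ≠ w)).length : Int) := by
  have h := pvLenSplit w t
  rw [List.count_cons_self, List.length_cons]
  push_cast
  omega

-- counts are preserved on the filtered remainder (for the still-present words)
lemma pvCountFilter (w v : String) (h : v ≠ w) (t : List String) :
    (w :: t).count v = (t.filter (fun x => x ≠ w)).count v := by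
  rw [List.count_filter (by simpa using h), List.count_cons_of_ne (Ne.symm h)]

-- B's accumulators factor out of the loop
lemma pvLoopShift : ∀ (n : ℕ) (l : List String), l.length ≤ n → ∀ (ws : List String) (os : List Int),
    pvUniqLoop l ws os = (ws ++ (pvUniqLoop l [] []).1, os ++ (pvUniqLoop l [] []).2) := by
  intro n
  induction n with
  | zero =>
    intro l hl ws os
    have : l = [] := List.length_eq_zero_iff.mp (Nat.le_zero.mp hl)
    subst this
    simp [pvUniqLoop]
  | succ n ih =>
    intro l hl ws os
    match l with
    | [] => simp [pvUniqLoop]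
    | w :: t =>
      have hlen : (t.filter (fun x => x ≠ w)).length ≤ n := by
        have := List.length_filter_le (fun x => decide (x ≠ w)) t
        simp only [List.length_cons] at hl
        omega
      rw [pvUniqLoop, pvUniqLoop]
      simp only [List.nil_append]
      rw [ih _ hlen (ws ++ [w]), ih _ hlen [w]]
      simp

-- MAIN: A's inner fold computes exactly B's head-and-filter loop
lemma pvInnerEq : ∀ (n : ℕ) (l : List String), l.length ≤ n →
    l.foldl (pvStep (fun v => (l.count v : Int))) ([], []) = pvUniqLoop l [] [] := by
  intro n
  induction n with
  | zero =>
    intro l hl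
    have : l = [] := List.length_eq_zero_iff.mp (Nat.le_zero.mp hl)
    subst this
    simp [pvUniqLoop]
  | succ n ih =>
    intro l hl
    match l with
    | [] => simp [pvUniqLoop]
    | w :: t =>
      have hlen : (t.filter (fun x => x ≠ w)).length ≤ n := by
        have := List.length_filter_le (fun x => decide (x ≠ w)) t
        simp only [List.length_cons] at hl
        omega
      -- first step of A's fold (the unique list is empty, w is taken)
      have step1 : (w :: t).foldl (pvStep (fun v => ((w :: t).count v : Int))) ([], [])
          = t.foldl (pvStep (fun v => ((w :: t).count v : Int))) ([w], [((w :: t).count w : Int)]) := by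
        simp [pvStep]
      rw [step1]
      -- the later occurrences of w are skipped by A: filtering them out changes nothing
      rw [pvSkip _ w t ([w], [((w :: t).count w : Int)]) (by simp)]
      -- switch the count table from (w :: t) to the filtered remainder
      have hcongr : (t.filter (fun x => x ≠ w)).foldl
            (pvStep (fun v => ((w :: t).count v : Int)))
            ([w], [((w :: t).count w : Int)])
          = (t.filter (fun x => x ≠ w)).foldl
            (pvStep (fun v => ((t.filter (fun x => x ≠ w)).count v : Int)))
            ([w], [((w :: t).count w : Int)]) := by
        apply PySem.List.foldl_congr_mem
        intro acc x hx
        have hxw : x ≠ w := by simpa using List.of_mem_filter hx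
        unfold pvStep
        simp only [pvCountFilter w x hxw t]
      rw [hcongr]
      -- factor out the [w] prefix of the accumulators
      have hnot : ∀ x ∈ t.filter (fun x => x ≠ w), x ∉ [w] := by
        intro x hx
        simpa using List.of_mem_filter hx
      have hshift := pvShift (fun v => ((t.filter (fun x => x ≠ w)).count v : Int))
        (t.filter (fun x => x ≠ w)) [w] [] [((w :: t).count w : Int)] [] hnot
      simp only [List.append_nil] at hshift
      rw [hshift]
      -- recursion on the filtered remainder, then unfold B one step
      rw [ih _ hlen, pvCountLen w t]
      conv_rhs => rw [pvUniqLoop]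
      simp only [List.nil_append]
      rw [pvLoopShift (t.filter (fun x => x ≠ w)).length _ le_rfl [w]]

-- ===== VERDICT (by name: the statement is the Claim_ definition above) =====
theorem get_occurences_spec : Claim_equal_get_occurences := by
  intro matrix _
  unfold Spec_get_occurences get_occurences get_occurences_alt
  apply congrArg (fun r : List (List String) × List (List Int) => (r.1, r.2))
  apply PySem.List.foldl_congr_mem
  intro acc l _
  rw [show (fun (st : List String × List Int) word =>
      if st.1.contains word then st
      else (st.1 ++ [word], st.2 ++ [(PySem.List.count l word : Int)]))
    = pvStep (fun v => (l.count v : Int)) from by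
      funext st word; simp [pvStep, PySem.List.count_eq]]
  rw [pvInnerEq l.length l le_rfl]
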